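-- pv_equiv track=rewrite | github.com/ArneshDorsatwar/Finetuning | v2/scripts/prepare_training_data.py | validate_conversation_structure
-- ===== SOURCE A (Python) =====
-- def validate_conversation_structure(example: dict) -> bool:
--     """Validate conversation has proper structure."""
--     convs = example.get('conversations', [])
--     if len(convs) < 2:
--         return False
--
--     # First message should be human
--     if convs[0].get('from') != 'human':
--         return False
--
--     # Check alternating pattern (allowing tool responses)
--     valid_after_human = {'gpt'}
--     valid_after_gpt = {'human', 'tool'}
--     valid_after_tool = {'gpt'}
--
--     prev_role = None
--     for conv in convs:
--         role = conv.get('from')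
--         if not role or not conv.get('value'):
--             return False
--
--         if prev_role == 'human' and role not in valid_after_human:
--             return False
--         if prev_role == 'gpt' and role not in valid_after_gpt:
--             return False
--         if prev_role == 'tool' and role not in valid_after_tool:
--             return False
--
--         prev_role = role
--
--     return True
-- ===== SOURCE B (Python) =====
-- def validate_conversation_structure(example: dict) -> bool:
--     """Validate conversation has proper structure."""
--     convs = example.get('conversations', [])
--     roles = [c.get('from') for c in convs]
--     if len(convs) < 2 or roles[0] != 'human':
--         return False
--     # every message must carry a truthy role and a truthy value
--     if not all(r and c.get('value') for r, c in zip(roles, convs)):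
--         return False
--     # encode the role sequence as a word over {h,g,t,x} and reject exactly
--     # when a forbidden bigram occurs as a substring
--     s = ''.join({'human': 'h', 'gpt': 'g', 'tool': 't'}.get(r, 'x') for r in roles)
--     return not any(bad in s for bad in ('hh', 'ht', 'hx', 'gg', 'gx', 'th', 'tt', 'tx'))
-- ===== Notes on version B (the rewrite author's own statement) =====
-- stated objective: alternative
-- what changed: A's single stateful loop carrying prev_role is replaced by encoding the role sequence as a word over the alphabet {h,g,t,x} and rejecting exactly when one of the eight forbidden two-letter bigrams occurs as a substring, after separate guard and field-validity passes.
import Mathlib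
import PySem

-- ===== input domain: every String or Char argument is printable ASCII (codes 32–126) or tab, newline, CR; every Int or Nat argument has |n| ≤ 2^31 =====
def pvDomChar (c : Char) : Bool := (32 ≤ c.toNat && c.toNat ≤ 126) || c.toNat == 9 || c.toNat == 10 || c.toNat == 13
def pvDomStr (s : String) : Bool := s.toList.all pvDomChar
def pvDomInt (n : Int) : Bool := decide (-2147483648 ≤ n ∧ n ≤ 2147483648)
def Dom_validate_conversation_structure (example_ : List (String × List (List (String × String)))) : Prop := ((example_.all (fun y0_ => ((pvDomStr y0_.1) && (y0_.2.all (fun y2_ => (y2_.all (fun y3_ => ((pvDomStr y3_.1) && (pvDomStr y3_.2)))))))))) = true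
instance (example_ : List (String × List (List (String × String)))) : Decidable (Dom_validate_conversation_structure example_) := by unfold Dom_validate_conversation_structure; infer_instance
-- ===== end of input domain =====

-- B replaces A's stateful loop by encoding the role sequence as a word over {h,g,t,x}
-- and rejecting exactly when a forbidden bigram occurs as a substring; objective: alternative algorithm, same cost.

-- ===== PORT A =====
-- conv.get(k) on a message dict (assoc list, first match)
def cGet (c : List (String × String)) (k : String) : Option String :=
  (PySem.Dict.mk c).get? k

-- Python truthiness of an Optional[str]: None and "" are falsy
def truthyS (o : Option String) : Bool :=
  match o with
  | none => false
  | some s => !(s == "")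

-- A's for-loop over convs carrying prev_role
def loopA (prev_role : Option String) (convs : List (List (String × String))) : Bool :=
  match convs with
  | [] => true
  | conv :: rest =>
    let role := cGet conv "from"
    if !truthyS role || !truthyS (cGet conv "value") then false
    -- role is a truthy string here, so 'role not in {...}' is option equality with the literals
    else if prev_role == some "human" && !(role == some "gpt") then false
    else if prev_role == some "gpt" && !(role == some "human" || role == some "tool") then false
    else if prev_role == some "tool" && !(role == some "gpt") then false
    else loopA role rest

def validate_conversation_structure (example_ : List (String × List (List (String × String)))) : Bool :=
  let convs := ((PySem.Dict.mk example_).get? "conversations").getD []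
  match convs with
  | [] => false
  | [_] => false          -- len(convs) < 2
  | c0 :: rest =>
    if !(cGet c0 "from" == some "human") then false
    else loopA none (c0 :: rest)

-- ===== PORT B =====
-- {'human':'h','gpt':'g','tool':'t'}.get(r, 'x')
def encB (r : Option String) : Char :=
  match r with
  | some "human" => 'h'
  | some "gpt"   => 'g'
  | some "tool"  => 't'
  | _            => 'x'

-- Python's substring test 'needle in hay', ported by hand over List Char;
-- exact: scans every suffix of hay for needle as a prefix ('' in s is True)
def pyInStr (needle hay : List Char) : Bool :=
  match hay with
  | [] => needle.isEmpty
  | a :: t => needle.isPrefixOf (a :: t) || pyInStr needle t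

def forbiddenB : List (List Char) :=
  [['h','h'], ['h','t'], ['h','x'], ['g','g'], ['g','x'], ['t','h'], ['t','t'], ['t','x']]

def validate_conversation_structure_alt (example_ : List (String × List (List (String × String)))) : Bool :=
  let convs := ((PySem.Dict.mk example_).get? "conversations").getD []
  let roles := convs.map (fun c => cGet c "from")
  if convs.length < 2 || !(roles.headD none == some "human") then false
  else if !((roles.zip convs).all (fun rc => truthyS rc.1 && truthyS (cGet rc.2 "value"))) then false
  else
    let s := roles.map encB
    !(forbiddenB.any (fun bad => pyInStr bad s))

-- ===== PRECONDITION & SPEC =====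
def Spec_validate_conversation_structure (example_ : List (String × List (List (String × String)))) (out : Bool) : Prop := out = validate_conversation_structure_alt example_
instance (example_ : List (String × List (List (String × String)))) (out : Bool) : Decidable (Spec_validate_conversation_structure example_ out) := by unfold Spec_validate_conversation_structure; infer_instance

-- ===== CLAIM (what is proved, stated in full; the proofs are below) =====
def Claim_equal_validate_conversation_structure : Prop := ∀ (example_ : List (String × List (List (String × String)))), Dom_validate_conversation_structure example_ → Spec_validate_conversation_structure example_ (validate_conversation_structure example_)

-- ===== LEMMAS AND PROOFS =====

-- the transition check on two (optional) roles, as A enforces it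
def pairO (p r : Option String) : Bool :=
  !((p == some "human" && !(r == some "gpt"))
    || ((p == some "gpt" && !((r == some "human") || (r == some "tool")))
    || (p == some "tool" && !(r == some "gpt"))))

-- the chain of pairwise checks, as a recursion carrying the previous role
def chainO (p : Option String) (convs : List (List (String × String))) : Bool :=
  match convs with
  | [] => true
  | c :: rest => pairO p (cGet c "from") && chainO (cGet c "from") rest

theorem ite3 (a b c X : Bool) :
    (if a = true then false else if b = true then false else if c = true then false else X)
      = (!(a || (b || c)) && X) := by
  cases a <;> cases b <;> cases c <;> simp

theorem loopA_eq (convs : List (List (String × String))) (p : Option String) :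
    loopA p convs = ((convs.all (fun c => truthyS (cGet c "from") && truthyS (cGet c "value"))) && chainO p convs) := by
  induction convs generalizing p with
  | nil => rfl
  | cons c rest ih =>
    rw [loopA, List.all_cons, chainO, ih]
    by_cases h1 : truthyS (cGet c "from") = true
    · by_cases h2 : truthyS (cGet c "value") = true
      · simp only [h1, h2, Bool.not_true, Bool.or_self, Bool.false_eq_true, if_false,
          Bool.true_and, ite3, pairO]
        cases (!(p == some "human" && !cGet c "from" == some "gpt" ||
            (p == some "gpt" && !(cGet c "from" == some "human" || cGet c "from" == some "tool") ||
             p == some "tool" && !cGet c "from" == some "gpt")))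
          <;> simp [Bool.and_comm, Bool.and_left_comm]
      · simp only [Bool.not_eq_true] at h2; simp [h1, h2]
    · simp only [Bool.not_eq_true] at h1; simp [h1]

theorem zip_all_pairO (rest : List (List (String × String))) (c : List (String × String)) :
    ((c :: rest).zip rest).all (fun pn => pairO (cGet pn.1 "from") (cGet pn.2 "from"))
      = chainO (cGet c "from") rest := by
  induction rest generalizing c with
  | nil => rfl
  | cons c1 rs ih => rw [List.zip_cons_cons, List.all_cons, ih c1, chainO]

-- Python 'in' for a two-character needle = some adjacent pair matches
theorem pyInStr_bigram (a b : Char) (l : List Char) :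
    pyInStr [a, b] l = (l.zip l.tail).any (fun p => p.1 == a && p.2 == b) := by
  induction l with
  | nil => rfl
  | cons c t ih =>
    rw [pyInStr, ih]
    cases t with
    | nil => simp [List.isPrefixOf]
    | cons d u =>
      simp [List.isPrefixOf, List.zip_cons_cons, BEq.comm]

theorem encB_other (s : String) (h1 : s ≠ "human") (h2 : s ≠ "gpt") (h3 : s ≠ "tool") :
    encB (some s) = 'x' := by
  unfold encB
  split <;> simp_all

theorem encB_cases (r : Option String) :
    encB r = 'h' ∨ encB r = 'g' ∨ encB r = 't' ∨ encB r = 'x' := by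
  cases r with
  | none => right; right; right; rfl
  | some s =>
    by_cases h1 : s = "human"
    · subst h1; left; rfl
    · by_cases h2 : s = "gpt"
      · subst h2; right; left; rfl
      · by_cases h3 : s = "tool"
        · subst h3; right; right; left; rfl
        · right; right; right; exact encB_other s h1 h2 h3

theorem encB_eq_h (r : Option String) : (encB r == 'h') = (r == some "human") := by
  cases r with
  | none => rfl
  | some s =>
    by_cases h1 : s = "human"
    · subst h1; rfl
    · by_cases h2 : s = "gpt"
      · subst h2; rfl
      · by_cases h3 : s = "tool"
        · subst h3; rfl
        · rw [encB_other s h1 h2 h3]; simp [h1]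

theorem encB_eq_g (r : Option String) : (encB r == 'g') = (r == some "gpt") := by
  cases r with
  | none => rfl
  | some s =>
    by_cases h1 : s = "human"
    · subst h1; rfl
    · by_cases h2 : s = "gpt"
      · subst h2; rfl
      · by_cases h3 : s = "tool"
        · subst h3; rfl
        · rw [encB_other s h1 h2 h3]; simp [h2]

theorem encB_eq_t (r : Option String) : (encB r == 't') = (r == some "tool") := by
  cases r with
  | none => rfl
  | some s =>
    by_cases h1 : s = "human"
    · subst h1; rfl
    · by_cases h2 : s = "gpt"
      · subst h2; rfl
      · by_cases h3 : s = "tool"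
        · subst h3; rfl
        · rw [encB_other s h1 h2 h3]; simp [h3]

-- the per-pair forbidden-bigram check (in the right-associated shape the scan produces)
theorem gp_pairO (r1 r2 : Option String) :
    (!((encB r1 == 'h' && encB r2 == 'h') ||
       ((encB r1 == 'h' && encB r2 == 't') ||
       ((encB r1 == 'h' && encB r2 == 'x') ||
       ((encB r1 == 'g' && encB r2 == 'g') ||
       ((encB r1 == 'g' && encB r2 == 'x') ||
       ((encB r1 == 't' && encB r2 == 'h') ||
       ((encB r1 == 't' && encB r2 == 't') ||
        (encB r1 == 't' && encB r2 == 'x')))))))))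
      = pairO r1 r2 := by
  cases r1 with
  | none =>
    have : encB none = 'x' := rfl
    rw [this]; simp [pairO]
  | some s =>
    by_cases h1 : s = "human"
    · subst h1
      have e : encB (some "human") = 'h' := rfl
      have hg := encB_eq_g r2
      rw [e]
      rcases encB_cases r2 with h | h | h | h <;> rw [h] at hg ⊢ <;>
        simp [pairO, ← hg]
    · by_cases h2 : s = "gpt"
      · subst h2
        have e : encB (some "gpt") = 'g' := rfl
        have hh := encB_eq_h r2
        have ht := encB_eq_t r2
        rw [e]
        rcases encB_cases r2 with h | h | h | h <;> rw [h] at hh ht ⊢ <;>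
          simp [pairO, ← hh, ← ht]
      · by_cases h3 : s = "tool"
        · subst h3
          have e : encB (some "tool") = 't' := rfl
          have hg := encB_eq_g r2
          rw [e]
          rcases encB_cases r2 with h | h | h | h <;> rw [h] at hg ⊢ <;>
            simp [pairO, ← hg]
        · rw [encB_other s h1 h2 h3]
          simp [pairO, h1, h2, h3]

-- De Morgan regrouping of the 8-way scan, head vs tail
theorem regroup (b1 b2 b3 b4 b5 b6 b7 b8 c1 c2 c3 c4 c5 c6 c7 c8 : Bool) :
    (!((b1 || c1) || ((b2 || c2) || ((b3 || c3) || ((b4 || c4) || ((b5 || c5) ||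
        ((b6 || c6) || ((b7 || c7) || (b8 || c8)))))))))
      = ((!(b1 || (b2 || (b3 || (b4 || (b5 || (b6 || (b7 || b8)))))))) &&
         (!(c1 || (c2 || (c3 || (c4 || (c5 || (c6 || (c7 || c8))))))))) := by
  rw [Bool.eq_iff_iff]
  simp only [Bool.not_or, Bool.and_eq_true, Bool.not_eq_eq_eq_not, Bool.not_true,
    Bool.or_eq_false_iff]
  tauto

-- the forbidden-bigram scan over the encoded roles = every adjacent pair passes pairO
theorem noBad_eq (roles : List (Option String)) :
    (!(forbiddenB.any (fun bad => pyInStr bad (roles.map encB))))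
      = (roles.zip roles.tail).all (fun p => pairO p.1 p.2) := by
  have hzip : ((roles.map encB).zip ((roles.map encB)).tail)
      = (roles.zip roles.tail).map (Prod.map encB encB) := by
    rw [← List.map_tail, List.zip_map]
  simp only [forbiddenB, List.any_cons, List.any_nil, pyInStr_bigram, hzip, List.any_map,
    Bool.or_false]
  induction (roles.zip roles.tail) with
  | nil => rfl
  | cons p ps ih =>
    simp only [List.any_cons, List.all_cons, Function.comp, Prod.map]
    rw [regroup, ih, gp_pairO]

-- push the validity pass through the role map: zip(map f l, l)
theorem zip_map_self {A B : Type} (f : A -> B) (g : B × A -> Bool) (l : List A) :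
    ((l.map f).zip l).all g = l.all (fun c => g (f c, c)) := by
  induction l with
  | nil => rfl
  | cons a t ih => rw [List.map_cons, List.zip_cons_cons, List.all_cons, List.all_cons, ih]

-- push the adjacency pass through the role map
theorem zip_roles {A : Type} (f : A -> Option String) (l : List A) :
    ((l.map f).zip (l.map f).tail).all (fun p => pairO p.1 p.2)
      = (l.zip l.tail).all (fun pn => pairO (f pn.1) (f pn.2)) := by
  rw [← List.map_tail, List.zip_map, List.all_map]
  rfl

-- ===== VERDICT (by name: the statement is the Claim_ definition above) =====
theorem validate_conversation_structure_spec : Claim_equal_validate_conversation_structure := by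
  intro example_ _
  unfold Spec_validate_conversation_structure
  unfold validate_conversation_structure validate_conversation_structure_alt
  cases hc : ((PySem.Dict.mk example_).get? "conversations").getD [] with
  | nil => rfl
  | cons c0 rest =>
    cases rest with
    | nil => rfl
    | cons c1 rs =>
      dsimp only
      by_cases hf : (cGet c0 "from" == some "human") = true
      · rw [loopA_eq]
        have hguard : (decide ((c0 :: c1 :: rs : List (List (String × String))).length < 2)
            || !((((c0 :: c1 :: rs).map (fun c => cGet c "from")).headD none) == some "human")) = false := by
          simp [hf]
        rw [hguard, zip_map_self, noBad_eq, zip_roles]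
        simp only [Bool.false_eq_true, if_false, Bool.not_true, Bool.not_false]
        by_cases ha : ((c0 :: c1 :: rs).all (fun c => truthyS (cGet c "from") && truthyS (cGet c "value"))) = true
        · rw [ha, List.tail_cons, zip_all_pairO (c1 :: rs) c0]
          simp [chainO, pairO, hf]
        · simp only [Bool.not_eq_true] at ha
          rw [ha]
          simp
      · simp only [Bool.not_eq_true] at hf
        simp [hf]
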